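-- pv_equiv track=rewrite | github.com/kfhaKB/Ret-counter-offentlig | Kommaformatering/Uden_citationstegn.py | split_last_n_commas
-- ===== SOURCE A (Python) =====
-- def split_last_n_commas(s, n=23):
--     #Position af sidset 23 kommaer
--     comma_positions = [i for i, char in enumerate(reversed(s)) if char == ',']
--     if len(comma_positions) < n:
--         #Mindre end n kommaer, så split alle
--         split_positions = [len(s) - i - 1 for i in comma_positions]
--     else:
--         #Ellers så split kun 23 sidste kommaer
--         split_positions = [len(s) - i - 1 for i in comma_positions[:n]]
--
--     #Splitter string (rækker) med brug af ovenstående position af kommaer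
--     parts = []
--     prev_pos = 0
--     for pos in sorted(split_positions):
--         parts.append(s[prev_pos:pos])
--         prev_pos = pos + 1
--     parts.append(s[prev_pos:])  #Sidste del af string
--
--     return parts
-- ===== SOURCE B (Python) =====
-- def split_last_n_commas(s, n=23):
--     # Idiomatic: str.rsplit splits from the right at most n times,
--     # i.e. exactly at the last n commas (all of them if fewer).
--     return s.rsplit(',', n)
-- ===== Notes on version B (the rewrite author's own statement) =====
-- stated objective: idiomatic
-- what changed: The whole position-finding (enumerate over the reversed string), index conversion, sort and manual slicing loop is replaced by the single built-in call s.rsplit(',', n), which performs the same splitting in one right-to-left C-level pass with no intermediate position lists.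
-- outside the precondition, e.g. on split_last_n_commas('a,b,c', -1): A returns ['a,b', 'c'], B returns ['a', 'b', 'c']
import Mathlib
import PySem

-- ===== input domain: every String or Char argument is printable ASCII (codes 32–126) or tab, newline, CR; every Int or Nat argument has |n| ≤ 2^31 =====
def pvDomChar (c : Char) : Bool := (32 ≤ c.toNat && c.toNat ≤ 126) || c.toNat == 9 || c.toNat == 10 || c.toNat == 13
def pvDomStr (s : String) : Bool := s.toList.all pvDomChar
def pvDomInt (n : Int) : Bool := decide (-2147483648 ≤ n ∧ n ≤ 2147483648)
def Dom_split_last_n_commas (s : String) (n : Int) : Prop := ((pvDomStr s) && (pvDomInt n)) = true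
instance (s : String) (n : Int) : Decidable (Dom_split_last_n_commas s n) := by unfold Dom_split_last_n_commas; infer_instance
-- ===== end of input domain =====

-- B replaces A's enumerate/sort/slice machinery by a single right-to-left rsplit pass (idiomatic one-liner in Python); equivalence proved for n ≥ 0.


-- ===== PORT A =====
def split_last_n_commas (s : String) (n : Int) : List String :=
  -- comma_positions = [i for i, char in enumerate(reversed(s)) if char == ',']
  let comma_positions : List Int :=
    ((PySem.List.enumerate s.toList.reverse).filter (fun p => p.2 == ',')).map (·.1)
  -- the if/else choosing split_positions
  let split_positions : List Int :=
    if PySem.List.len comma_positions < n then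
      comma_positions.map (fun i => PySem.Str.len s - i - 1)
    else
      (PySem.List.slice comma_positions none (some n)).map (fun i => PySem.Str.len s - i - 1)
  -- parts = []; prev_pos = 0; for pos in sorted(split_positions): …
  let st := (PySem.List.sorted split_positions (fun x => x)).foldl
      (fun (st : List String × Int) pos =>
        (st.1 ++ [PySem.Str.slice s (some st.2) (some pos)], pos + 1))
      (([] : List String), (0 : Int))
  st.1 ++ [PySem.Str.slice s (some st.2) none]

-- ===== PORT B =====
-- Hand port of str.rsplit(',', n) (no PySem primitive): scan the reversed string,
-- cutting at most n times; exact for n ≥ 0, which Pre_ guarantees.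
def rsplitCommaGo : List Char → Nat → List Char → List String → List String
  | [], _, cur, acc => String.ofList cur :: acc
  | c :: rest, k, cur, acc =>
    if c = ',' ∧ 0 < k then rsplitCommaGo rest (k - 1) [] (String.ofList cur :: acc)
    else rsplitCommaGo rest k (c :: cur) acc

def split_last_n_commas_alt (s : String) (n : Int) : List String :=
  -- Python: maxsplit < 0 means no limit; s.length cuts suffice to split at every comma
  rsplitCommaGo s.toList.reverse (if n < 0 then s.toList.length else n.toNat) [] []

-- ===== PRECONDITION & SPEC =====
-- Pre_ excludes negative n (A still returns there): a negative split count is outside the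
-- function's natural domain of splitting at the last n commas, and there A's negative-slice
-- semantics and B's rsplit, which then splits at every comma, are two different unspecified corner behaviours.
def Pre_split_last_n_commas (s : String) (n : Int) : Prop := 0 ≤ n
instance (s : String) (n : Int) : Decidable (Pre_split_last_n_commas s n) := by unfold Pre_split_last_n_commas; infer_instance

def pvWitness_split_last_n_commas : String × Int := ("ab,c,d", 1)

def Spec_split_last_n_commas (s : String) (n : Int) (out : List String) : Prop := out = split_last_n_commas_alt s n
instance (s : String) (n : Int) (out : List String) : Decidable (Spec_split_last_n_commas s n out) := by unfold Spec_split_last_n_commas; infer_instance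

-- ===== CLAIM (what is proved, stated in full; the proofs are below) =====
def Claim_equal_split_last_n_commas : Prop := ∀ (s : String) (n : Int), Dom_split_last_n_commas s n → Pre_split_last_n_commas s n → Spec_split_last_n_commas s n (split_last_n_commas s n)

-- ===== LEMMAS AND PROOFS =====

-- ascending positions of ',' in a character list
def pvCommas : List Char → List Nat
  | [] => []
  | c :: t => (if c = ',' then [0] else []) ++ (pvCommas t).map (· + 1)

-- ascending positions of the last (at most) k commas of w
def pvLastCommas (w : List Char) (k : Nat) : List Nat :=
  (((pvCommas w.reverse).take k).map (fun j => w.length - 1 - j)).reverse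

-- the pieces obtained by splitting cs at the ascending positions ps, starting at prev
def pvParts : List Char → Nat → List Nat → List (List Char)
  | cs, prev, [] => [cs.drop prev]
  | cs, prev, p :: ps => (cs.drop prev).take (p - prev) :: pvParts cs (p + 1) ps

-- A's final 'parts.append(s[prev_pos:])' applied to the fold state
def pvFinish (s : String) (st : List String × Int) : List String :=
  st.1 ++ [PySem.Str.slice s (some st.2) none]

theorem pvCommas_lt (l : List Char) : ∀ j ∈ pvCommas l, j < l.length := by
  induction l with
  | nil => simp [pvCommas]
  | cons c t ih =>
    intro j hj
    simp only [pvCommas, List.mem_append, List.mem_map] at hj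
    rcases hj with hj | ⟨a, ha, rfl⟩
    · split at hj <;> simp_all
    · have := ih a ha; simp; omega

theorem pvCommas_pairwise (l : List Char) : (pvCommas l).Pairwise (· < ·) := by
  induction l with
  | nil => simp [pvCommas]
  | cons c t ih =>
    simp only [pvCommas]
    split
    · simp only [List.singleton_append, List.pairwise_cons, List.pairwise_map]
      constructor
      · intro b hb; simp only [List.mem_map] at hb; obtain ⟨a, _, rfl⟩ := hb; omega
      · exact ih.imp (by omega)
    · simp only [List.nil_append, List.pairwise_map]
      exact ih.imp (by omega)

theorem pvEnumFilter (l : List Char) (st : Int) :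
    ((PySem.List.enumerate l st).filter (fun p => p.2 == ',')).map (·.1)
      = (pvCommas l).map (fun (j : Nat) => st + (j : Int)) := by
  induction l generalizing st with
  | nil => simp [pvCommas, PySem.List.enumerate_nil]
  | cons c t ih =>
    have hf : ((fun (j : Nat) => st + (j : Int)) ∘ (· + 1))
        = (fun (j : Nat) => (st + 1) + (j : Int)) := by
      funext j; simp only [Function.comp]; push_cast; ring
    rw [PySem.List.enumerate_cons, List.filter_cons]
    by_cases hc : c = ','
    · subst hc
      rw [if_pos (by simp)]
      have hrhs : pvCommas (',' :: t) = 0 :: (pvCommas t).map (· + 1) := by simp [pvCommas]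
      rw [hrhs, List.map_cons, List.map_cons, List.map_map, hf, ih]
      simp
    · rw [if_neg (by simp [hc])]
      have hrhs : pvCommas (c :: t) = (pvCommas t).map (· + 1) := by simp [pvCommas, hc]
      rw [hrhs, ih, List.map_map, hf]

theorem pvLastCommas_lt (w : List Char) (k : Nat) : ∀ p ∈ pvLastCommas w k, p < w.length := by
  intro p hp
  simp only [pvLastCommas, List.mem_reverse, List.mem_map] at hp
  obtain ⟨j, hj, rfl⟩ := hp
  have hj' := pvCommas_lt _ _ (List.mem_of_mem_take hj)
  simp only [List.length_reverse] at hj'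
  omega

theorem pvLastCommas_snoc_comma (w : List Char) (k : Nat) (hk : 0 < k) :
    pvLastCommas (w ++ [',']) k = pvLastCommas w (k - 1) ++ [w.length] := by
  obtain ⟨k', rfl⟩ : ∃ k', k = k' + 1 := ⟨k - 1, by omega⟩
  unfold pvLastCommas
  have hrev : (w ++ [',']).reverse = ',' :: w.reverse := by simp
  have hc : pvCommas (',' :: w.reverse) = 0 :: (pvCommas w.reverse).map (· + 1) := by
    simp [pvCommas]
  have h1 : ((fun j => (w ++ [',']).length - 1 - j) ∘ (· + 1))
      = (fun (j : Nat) => w.length - 1 - j) := by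
    funext j; simp only [Function.comp, List.length_append, List.length_cons, List.length_nil]
    omega
  have h2 : (w ++ [',']).length - 1 - 0 = w.length := by simp
  rw [hrev, hc, List.take_succ_cons, ← List.map_take, List.map_cons, List.map_map, h1, h2,
    List.reverse_cons, Nat.add_sub_cancel]

theorem pvLastCommas_snoc_other (w : List Char) (c : Char) (k : Nat) (h : ¬ (c = ',' ∧ 0 < k)) :
    pvLastCommas (w ++ [c]) k = pvLastCommas w k := by
  by_cases hc : c = ','
  · have hk : k = 0 := by
      by_contra h'
      exact h ⟨hc, Nat.pos_of_ne_zero h'⟩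
    subst hk
    simp [pvLastCommas]
  · unfold pvLastCommas
    have hrev : (w ++ [c]).reverse = c :: w.reverse := by simp
    have hcm : pvCommas (c :: w.reverse) = (pvCommas w.reverse).map (· + 1) := by
      simp [pvCommas, hc]
    have h1 : ((fun j => (w ++ [c]).length - 1 - j) ∘ (· + 1))
        = (fun (j : Nat) => w.length - 1 - j) := by
      funext j; simp only [Function.comp, List.length_append, List.length_cons, List.length_nil]
      omega
    rw [hrev, hcm, ← List.map_take, List.map_map, h1]

theorem pvParts_snoc (w cur : List Char) (ps : List Nat) :
    ∀ prev : Nat, (∀ p ∈ ps, p < w.length) → prev ≤ w.length →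
    pvParts (w ++ ',' :: cur) prev (ps ++ [w.length]) = pvParts w prev ps ++ [cur] := by
  induction ps with
  | nil =>
    intro prev _ hprev
    simp only [List.nil_append, pvParts]
    have hd : (w ++ ',' :: cur).drop prev = w.drop prev ++ ',' :: cur :=
      List.drop_append_of_le_length hprev
    have hlen : (w.drop prev).length = w.length - prev := by simp
    rw [hd, List.take_left' hlen]
    have hd2 : (w ++ ',' :: cur).drop (w.length + 1) = cur := by
      rw [List.drop_append]
      simp
    rw [hd2]
    rfl
  | cons p ps ih =>
    intro prev hps hprev
    have hp : p < w.length := hps p (by simp)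
    simp only [List.cons_append, pvParts]
    have hd : (w ++ ',' :: cur).drop prev = w.drop prev ++ ',' :: cur :=
      List.drop_append_of_le_length hprev
    have ht : ((w.drop prev) ++ ',' :: cur).take (p - prev) = (w.drop prev).take (p - prev) := by
      refine List.take_append_of_le_length ?_
      simp; omega
    rw [hd, ht, ih (p + 1) (fun q hq => hps q (by simp [hq])) (by omega)]

theorem pvLoopSpec (r : List Char) : ∀ (k : Nat) (cur : List Char) (acc : List String),
    rsplitCommaGo r k cur acc
      = (pvParts (r.reverse ++ cur) 0 (pvLastCommas r.reverse k)).map (fun p => String.ofList p) ++ acc := by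
  induction r with
  | nil =>
    intro k cur acc
    simp [rsplitCommaGo, pvLastCommas, pvCommas, pvParts]
  | cons c rest ih =>
    intro k cur acc
    simp only [rsplitCommaGo]
    split
    · rename_i h
      obtain ⟨rfl, hk⟩ := h
      rw [ih]
      have hsnoc := pvLastCommas_snoc_comma rest.reverse k hk
      have hparts := pvParts_snoc rest.reverse cur (pvLastCommas rest.reverse (k - 1)) 0
        (pvLastCommas_lt _ _) (Nat.zero_le _)
      simp only [List.reverse_cons, hsnoc, List.append_assoc, List.singleton_append, hparts,
        List.map_append, List.append_nil]
      simp
    · rename_i h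
      rw [ih]
      have hsnoc := pvLastCommas_snoc_other rest.reverse c k h
      simp only [List.reverse_cons, hsnoc, List.append_assoc, List.singleton_append]

theorem pvFinish_slice (s : String) (prev : Nat) :
    PySem.Str.slice s (some (prev : Int)) none = String.ofList (s.toList.drop prev) := by
  rw [← String.toList_inj]
  rw [PySem.Str.toList_slice, PySem.Chars.slice_eq_listSlice, PySem.List.slice_from_natCast]
  simp

theorem pvSlice_take (s : String) (prev p : Nat) :
    PySem.Str.slice s (some (prev : Int)) (some (p : Int))
      = String.ofList ((s.toList.drop prev).take (p - prev)) := by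
  rw [← String.toList_inj]
  rw [PySem.Str.toList_slice, PySem.Chars.slice_eq_listSlice, PySem.List.slice_natCast]
  simp

theorem pvFoldA (s : String) (ps : List Nat) : ∀ (prev : Nat) (acc : List String),
    pvFinish s ((ps.map (fun (p : Nat) => (p : Int))).foldl
        (fun (st : List String × Int) pos =>
          (st.1 ++ [PySem.Str.slice s (some st.2) (some pos)], pos + 1)) (acc, (prev : Int)))
      = acc ++ (pvParts s.toList prev ps).map String.ofList := by
  induction ps with
  | nil =>
    intro prev acc
    simp only [List.map_nil, List.foldl_nil, pvFinish, pvParts, List.map_cons, List.map_nil]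
    rw [pvFinish_slice]
  | cons p ps ih =>
    intro prev acc
    simp only [List.map_cons, List.foldl_cons]
    have hcast : ((p : Int) + 1) = ((p + 1 : Nat) : Int) := by push_cast; ring
    rw [hcast, ih (p + 1) (acc ++ [PySem.Str.slice s (some (prev : Int)) (some (p : Int))])]
    rw [pvSlice_take]
    simp [pvParts]

theorem pvMain (s : String) (n : Int) (hn : 0 ≤ n) :
    split_last_n_commas s n = split_last_n_commas_alt s n := by
  have hA : split_last_n_commas s n
      = pvFinish s ((PySem.List.sorted
          (if PySem.List.len (((PySem.List.enumerate s.toList.reverse).filter (fun p => p.2 == ',')).map (·.1)) < n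
           then (((PySem.List.enumerate s.toList.reverse).filter (fun p => p.2 == ',')).map (·.1)).map
                  (fun i => PySem.Str.len s - i - 1)
           else (PySem.List.slice (((PySem.List.enumerate s.toList.reverse).filter (fun p => p.2 == ',')).map (·.1))
                  none (some n)).map (fun i => PySem.Str.len s - i - 1))
          (fun x => x)).foldl
          (fun (st : List String × Int) pos =>
            (st.1 ++ [PySem.Str.slice s (some st.2) (some pos)], pos + 1))
          (([] : List String), (0 : Int))) := rfl
  have h1 : ((PySem.List.enumerate s.toList.reverse).filter (fun p => p.2 == ',')).map (·.1)
      = (pvCommas s.toList.reverse).map (fun (j : Nat) => (j : Int)) := by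
    rw [pvEnumFilter]
    exact List.map_congr_left (fun j _ => by push_cast; ring)
  have hsp : (if PySem.List.len (((PySem.List.enumerate s.toList.reverse).filter (fun p => p.2 == ',')).map (·.1)) < n
           then (((PySem.List.enumerate s.toList.reverse).filter (fun p => p.2 == ',')).map (·.1)).map
                  (fun i => PySem.Str.len s - i - 1)
           else (PySem.List.slice (((PySem.List.enumerate s.toList.reverse).filter (fun p => p.2 == ',')).map (·.1))
                  none (some n)).map (fun i => PySem.Str.len s - i - 1))
      = ((pvCommas s.toList.reverse).take n.toNat).map (fun (j : Nat) => PySem.Str.len s - (j : Int) - 1) := by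
    rw [h1]
    by_cases hcase : PySem.List.len ((pvCommas s.toList.reverse).map (fun (j : Nat) => (j : Int))) < n
    · rw [if_pos hcase]
      have hlen : (pvCommas s.toList.reverse).length ≤ n.toNat := by
        rw [PySem.List.len_eq, List.length_map] at hcase; omega
      rw [List.take_of_length_le hlen, List.map_map]
      simp [Function.comp]
    · rw [if_neg hcase, PySem.List.slice_to _ hn, ← List.map_take, List.map_map]
      rfl
  have hyeq : ((pvCommas s.toList.reverse).take n.toNat).map (fun (j : Nat) => PySem.Str.len s - (j : Int) - 1)
      = ((pvLastCommas s.toList n.toNat).map (fun (p : Nat) => (p : Int))).reverse := by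
    unfold pvLastCommas
    rw [List.map_reverse, List.reverse_reverse, List.map_map]
    refine List.map_congr_left ?_
    intro j hj
    have hj' : j < s.toList.length := by
      have := pvCommas_lt _ _ (List.mem_of_mem_take hj)
      simpa using this
    simp only [Function.comp, PySem.Str.len_eq]
    omega
  have hpw : (((pvLastCommas s.toList n.toNat).map (fun (p : Nat) => (p : Int)))).Pairwise (· < ·) := by
    rw [List.pairwise_map]
    have : (pvLastCommas s.toList n.toNat).Pairwise (· < ·) := by
      unfold pvLastCommas
      rw [List.pairwise_reverse, List.pairwise_map]
      have hsub : ((pvCommas s.toList.reverse).take n.toNat).Pairwise (· < ·) :=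
        (pvCommas_pairwise _).sublist (List.take_sublist _ _)
      refine hsub.imp_of_mem ?_
      intro a b ha hb hab
      have hb' : b < s.toList.length := by
        have := pvCommas_lt _ _ (List.mem_of_mem_take hb)
        simpa using this
      omega
    exact this.imp (fun h => by exact_mod_cast h)
  have hsorted : PySem.List.sorted
        (((pvCommas s.toList.reverse).take n.toNat).map (fun (j : Nat) => PySem.Str.len s - (j : Int) - 1))
        (fun x => x)
      = (pvLastCommas s.toList n.toNat).map (fun (p : Nat) => (p : Int)) := by
    apply PySem.List.sorted_eq_of_perm_of_pairwise_lt
    · rw [hyeq]; exact (List.reverse_perm _).symm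
    · exact hpw
  have hfold := pvFoldA s (pvLastCommas s.toList n.toNat) 0 []
  have hB := pvLoopSpec s.toList.reverse n.toNat [] []
  have halt : split_last_n_commas_alt s n = rsplitCommaGo s.toList.reverse n.toNat [] [] := by
    unfold split_last_n_commas_alt
    rw [if_neg (by omega)]
  rw [hA, hsp, hsorted]
  simp only [Nat.cast_zero] at hfold
  rw [hfold]
  rw [halt, hB]
  simp

theorem split_last_n_commas_spec : Claim_equal_split_last_n_commas := by
  intro s n _ hn
  exact pvMain s n hn
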